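-- pv_equiv track=rewrite | github.com/m0hammadb/CodeWarsChallenges | upsidedown.py | isUpsideDown
-- ===== SOURCE A (Python) =====
-- def isUpsideDown(number):
--     upDict = {1:1,6:9,8:8,9:6,0:0}
--     strNum = str(number)
--     length = len(strNum)
--     for i in range(length):
--         if(int(strNum[i]) not in upDict):
--             return False
--         upsideValue = str(upDict[int(strNum[i])])
--         if(strNum[length-i-1] != upsideValue):
--             return False
--
--     return True # if we get to this point no return False was entered so its true
-- ===== SOURCE B (Python) =====
-- def isUpsideDown(number):
--     upDict = {1: 1, 6: 9, 8: 8, 9: 6, 0: 0}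
--     strNum = str(number)
--     for d in strNum:
--         if int(d) not in upDict:
--             return False
--     rotated = ''.join(str(upDict[int(d)]) for d in reversed(strNum))
--     return rotated == strNum
-- ===== Notes on version B (the rewrite author's own statement) =====
-- stated objective: simpler
-- what changed: Replaced A's interleaved per-index mirror comparison with a two-phase decomposition: one validation pass over the digits, then build the rotated string and compare it to the original in one equality test.
import Mathlib
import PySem

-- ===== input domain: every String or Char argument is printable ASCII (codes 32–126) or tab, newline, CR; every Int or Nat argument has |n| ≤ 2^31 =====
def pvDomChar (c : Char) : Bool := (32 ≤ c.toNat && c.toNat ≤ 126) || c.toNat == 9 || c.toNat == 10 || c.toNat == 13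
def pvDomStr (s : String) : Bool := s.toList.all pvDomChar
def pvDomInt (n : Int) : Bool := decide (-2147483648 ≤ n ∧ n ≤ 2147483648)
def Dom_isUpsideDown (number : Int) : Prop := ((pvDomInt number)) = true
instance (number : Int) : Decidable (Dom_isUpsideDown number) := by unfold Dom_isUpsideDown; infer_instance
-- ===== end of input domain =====

-- B replaces A's interleaved per-index mirror comparison by validate-then-transform-then-compare (objective: simpler).

-- ===== PORT A =====
def pvUpDict : PySem.Dict Int Int := PySem.Dict.ofList [(1, 1), (6, 9), (8, 8), (9, 6), (0, 0)]

-- the 'for i in range(length)' loop of A, with its two early 'return False's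
def pvLoopA (s : List Char) (i : Nat) : Bool :=
  if h : i < s.length then
    match PySem.Int.ofChars? [s[i]] with
    | none => false  -- int(strNum[i]) raises ValueError here; outside Pre_ (only a non-digit char, i.e. the '-' sign, reaches this)
    | some d =>
      if pvUpDict.contains d = false then false
      else if [s[s.length - i - 1]'(by omega)] ≠ PySem.Int.toChars (pvUpDict.getD d 0) then false
      else pvLoopA s (i + 1)
  else true
termination_by s.length - i

def isUpsideDown (number : Int) : Bool :=
  pvLoopA (PySem.Int.toChars number) 0

-- ===== PORT B =====
-- 'int(d) in upDict' for one character d (int(d) raising = false, unreachable under Pre_)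
def pvValid (c : Char) : Bool :=
  match PySem.Int.ofChars? [c] with
  | none => false
  | some d => pvUpDict.contains d

-- 'str(upDict[int(d)])' for one character d (only evaluated after validation)
def pvRot (c : Char) : List Char :=
  match PySem.Int.ofChars? [c] with
  | none => []
  | some d => PySem.Int.toChars (pvUpDict.getD d 0)

def isUpsideDown_alt (number : Int) : Bool :=
  let s := PySem.Int.toChars number
  if s.all pvValid then decide ((s.reverse.map pvRot).flatten = s) else false

-- ===== PRECONDITION & SPEC =====
-- Pre_ excludes negative numbers: there str(number) starts with '-' and the Python A raises ValueError at int('-').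
def Pre_isUpsideDown (number : Int) : Prop := 0 ≤ number
instance (number : Int) : Decidable (Pre_isUpsideDown number) := by unfold Pre_isUpsideDown; infer_instance
def pvWitness_isUpsideDown : Int := (69)

def Spec_isUpsideDown (number : Int) (out : Bool) : Prop := out = isUpsideDown_alt number
instance (number : Int) (out : Bool) : Decidable (Spec_isUpsideDown number out) := by unfold Spec_isUpsideDown; infer_instance

-- ===== CLAIM (what is proved, stated in full; the proofs are below) =====
def Claim_equal_isUpsideDown : Prop := ∀ (number : Int), Dom_isUpsideDown number → Pre_isUpsideDown number → Spec_isUpsideDown number (isUpsideDown number)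

-- ===== LEMMAS AND PROOFS =====

-- the per-index condition that A's step at index j checks
def pvP (s : List Char) (j : Nat) (hj : j < s.length) : Prop :=
  pvValid s[j] = true ∧ pvRot s[j] = [s[s.length - 1 - j]'(by omega)]

-- head of the (singleton) rotated image of a valid character
def pvG (c : Char) : Char := (pvRot c).headD ' '

lemma upDict_mk : pvUpDict = PySem.Dict.mk [(1, 1), (6, 9), (8, 8), (9, 6), (0, 0)] := by decide

lemma contains_cases (d : Int) (h : pvUpDict.contains d = true) :
    d = 1 ∨ d = 6 ∨ d = 8 ∨ d = 9 ∨ d = 0 := by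
  rw [upDict_mk] at h
  simp at h
  tauto

lemma rot_singleton (c : Char) (h : pvValid c = true) : pvRot c = [pvG c] := by
  unfold pvG
  cases hp : PySem.Int.ofChars? [c] with
  | none => simp [pvValid, hp] at h
  | some d =>
    simp only [pvValid, hp] at h
    rcases contains_cases d h with rfl | rfl | rfl | rfl | rfl <;> simp [pvRot, hp] <;> decide

lemma flatten_map_rot (s : List Char) (h : ∀ c ∈ s, pvValid c = true) :
    (s.map pvRot).flatten = s.map pvG := by
  induction s with
  | nil => rfl
  | cons c t ih =>
    simp only [List.map_cons, List.flatten_cons]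
    rw [rot_singleton c (h c (by simp)), ih (fun x hx => h x (by simp [hx]))]
    rfl

lemma pvLoopA_iff (s : List Char) (i : Nat) :
    pvLoopA s i = true ↔ ∀ j (hj : j < s.length), i ≤ j → pvP s j hj := by
  have key : ∀ k i, s.length - i ≤ k →
      (pvLoopA s i = true ↔ ∀ j (hj : j < s.length), i ≤ j → pvP s j hj) := by
    intro k
    induction k with
    | zero =>
      intro i hk
      have hni : ¬ i < s.length := by omega
      rw [pvLoopA]
      simp only [dif_neg hni]
      constructor
      · intro _ j hj hij; omega
      · intro _; trivial
    | succ k ih =>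
      intro i hk
      by_cases hi : i < s.length
      · rw [pvLoopA]
        simp only [dif_pos hi]
        have hrec := ih (i + 1) (by omega)
        cases hp : PySem.Int.ofChars? [s[i]] with
        | none =>
          simp only
          constructor
          · intro hfalse; exact absurd hfalse (by simp)
          · intro hall
            have := (hall i hi (le_refl i)).1
            simp [pvValid, hp] at this
        | some d =>
          simp only
          by_cases hc : pvUpDict.contains d = false
          · rw [if_pos hc]
            constructor
            · intro hfalse; exact absurd hfalse (by simp)
            · intro hall
              have := (hall i hi (le_refl i)).1
              simp [pvValid, hp] at this
              simp [this] at hc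
          · rw [if_neg hc]
            by_cases hcmp : [s[s.length - i - 1]'(by omega)] ≠ PySem.Int.toChars (pvUpDict.getD d 0)
            · simp only [if_pos hcmp]
              constructor
              · intro hfalse; exact absurd hfalse (by simp)
              · intro hall
                exfalso
                have h2 := (hall i hi (le_refl i)).2
                simp only [pvRot, hp] at h2
                apply hcmp
                rw [h2]
                rw [getElem_congr_idx (show s.length - i - 1 = s.length - 1 - i by omega)]
            · simp only [if_neg hcmp]
              simp only [ne_eq, not_not] at hcmp
              rw [hrec]
              constructor
              · intro hall j hj hij
                rcases Nat.lt_or_ge i j with hlt | hge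
                · exact hall j hj hlt
                · have hji : j = i := by omega
                  subst hji
                  refine ⟨by simp [pvValid, hp]; simpa using hc, ?_⟩
                  simp only [pvRot, hp]
                  rw [← hcmp]
                  exact congrArg (fun x => [x]) (getElem_congr_idx (by omega))
              · intro hall j hj hij
                exact hall j hj (by omega)
      · rw [pvLoopA]
        simp only [dif_neg hi]
        constructor
        · intro _ j hj hij; omega
        · intro _; trivial
  exact key (s.length - i) i (le_refl _)

lemma all_valid_iff (s : List Char) :
    s.all pvValid = true ↔ ∀ c ∈ s, pvValid c = true := by
  simp [List.all_eq_true]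

lemma main_lemma (s : List Char) :
    pvLoopA s 0 = (if s.all pvValid then decide ((s.reverse.map pvRot).flatten = s) else false) := by
  by_cases hv : s.all pvValid = true
  · have hvm : ∀ c ∈ s, pvValid c = true := (all_valid_iff s).1 hv
    have hvr : ∀ c ∈ s.reverse, pvValid c = true := by
      intro c hc; exact hvm c (List.mem_reverse.1 hc)
    rw [hv, if_pos rfl, flatten_map_rot s.reverse hvr]
    rw [Bool.eq_iff_iff, pvLoopA_iff, decide_eq_true_iff]
    constructor
    · intro hall
      apply List.ext_getElem
      · simp
      · intro i h1 h2
        have hi : i < s.length := h2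
        rw [List.getElem_map, List.getElem_reverse]
        have hP := hall (s.length - 1 - i) (by omega) (by omega)
        have h2 := hP.2
        rw [rot_singleton _ hP.1] at h2
        simp only [List.cons.injEq, and_true] at h2
        rw [h2]
        rw [getElem_congr_idx (show s.length - 1 - (s.length - 1 - i) = i by omega)]
    · intro heq j hj _
      refine ⟨hvm s[j] (by simp), ?_⟩
      rw [rot_singleton _ (hvm s[j] (by simp))]
      have hlen : (s.reverse.map pvG).length = s.length := by simp
      have h1 : s.length - 1 - j < s.length := by omega
      have := congrArg (fun l => l[s.length - 1 - j]?) heq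
      simp only at this
      rw [List.getElem?_eq_getElem (by simpa [hlen] using h1), List.getElem?_eq_getElem h1] at this
      have hv2 : (s.reverse.map pvG)[s.length - 1 - j]'(by simpa [hlen] using h1) = pvG s[j] := by
        rw [List.getElem_map, List.getElem_reverse]
        congr 2
        omega
      rw [hv2] at this
      simp only [Option.some.injEq] at this
      rw [this]
  · have hv' : s.all pvValid = false := by simpa using hv
    rw [hv']
    simp only [Bool.false_eq_true, if_false]
    cases hb : pvLoopA s 0 with
    | false => rfl
    | true =>
      exfalso
      have hall := (pvLoopA_iff s 0).1 hb
      apply hv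
      rw [all_valid_iff]
      intro c hc
      obtain ⟨j, hj, rfl⟩ := List.mem_iff_getElem.1 hc
      exact (hall j hj (Nat.zero_le j)).1

-- ===== VERDICT (by name: the statement is the Claim_ definition above) =====
theorem isUpsideDown_spec : Claim_equal_isUpsideDown := by
  intro number _ _
  unfold Spec_isUpsideDown isUpsideDown isUpsideDown_alt
  exact main_lemma _
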